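-- pv_equiv track=rewrite | github.com/chritzadz/coding_problems | kembalian.py | bisa_transaksi
-- ===== SOURCE A (Python) =====
-- def base7(price):
--     list = []
--     while price > 0:
--         list.append(price%7)
--         price = price // 7
--     return list
--
-- def kurang(price):
--     base_list = base7(price)
--     list = base7(price)
--     for i in range(len(list)):
--         list[i] = base_list[i]-1 if base_list[i] != 0 else 0
--
--     kurang = 0
--     for i in range(len(base_list)):
--         kurang += 7**i*list[i]
--     return kurang
--
-- def kembalian(price):
--     base_list = base7(price)
--     index_list_zero = []
--     for i in range(len(base_list)):
--         if base_list[i] == 0: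
--             index_list_zero.append(i)
--         else:
--             continue
--
--     add_value = 0
--     for i in index_list_zero:
--         add_value += 7**i
--
--     kembalian = add_value - kurang(price)
--     return kembalian
--
-- def bisa_transaksi(price):
--     state = True
--     final_list = base7(kembalian(price))
--     for i in final_list:
--         if i == 0 or i == 1:
--             state = True
--         if i > 1:
--             state = False
--             break
--     return state
-- ===== SOURCE B (Python) =====
-- def bisa_transaksi(price):
--     # n = number of base-7 digits of price
--     n = 0
--     p = price
--     while p > 0:
--         n += 1
--         p //= 7
--     if n == 0:
--         return True
--     # the n-digit base-7 repunit minus price equals A's "kembalian"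
--     k = (7 ** n - 1) // 6 - price
--     while k > 0:
--         if k % 7 > 1:
--             return False
--         k //= 7
--     return True
-- ===== Notes on version B (the rewrite author's own statement) =====
-- stated objective: simpler
-- what changed: Replaces the base7/kurang/kembalian three-helper digit-list pipeline with a closed-form subtraction (n-digit base-7 repunit minus price) followed by a single digit scan of the result.
import Mathlib
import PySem

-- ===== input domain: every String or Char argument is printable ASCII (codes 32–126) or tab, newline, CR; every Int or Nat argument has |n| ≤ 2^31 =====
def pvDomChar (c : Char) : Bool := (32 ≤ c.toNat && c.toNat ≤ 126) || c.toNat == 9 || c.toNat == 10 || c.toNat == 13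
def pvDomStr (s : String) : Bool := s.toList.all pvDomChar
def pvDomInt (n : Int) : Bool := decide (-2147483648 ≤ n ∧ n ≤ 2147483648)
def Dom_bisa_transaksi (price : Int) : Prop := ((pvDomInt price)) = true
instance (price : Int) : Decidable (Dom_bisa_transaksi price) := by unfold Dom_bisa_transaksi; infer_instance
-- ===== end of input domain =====

-- B folds A's base7/kurang/add_value pipeline into a closed-form repunit subtraction plus one digit scan (objective: simpler).

-- ===== PORT A =====
-- base7: while price > 0: list.append(price % 7); price //= 7
def base7 (price : Int) : List Int :=
  if _h : price > 0 then
    PySem.Int.mod price 7 :: base7 (PySem.Int.floordiv price 7)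
  else []
termination_by price.toNat
decreasing_by
  rw [PySem.Int.floordiv_eq_ediv_of_pos (by norm_num : (0:Int) < 7)]
  omega

-- kurang: per-digit "d-1 if d != 0 else 0", then sum 7**i * list[i]
def kurang (price : Int) : Int :=
  let base_list := base7 price
  let lst := (base7 price).map (fun x => if x ≠ 0 then x - 1 else 0)
  (List.range base_list.length).foldl (fun acc i => acc + 7 ^ i * lst.getD i 0) 0

-- kembalian: indices of zero digits, add_value = sum of 7**i over them, minus kurang
def kembalian (price : Int) : Int :=
  let base_list := base7 price
  let index_list_zero :=
    (List.range base_list.length).foldl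
      (fun acc i => if base_list.getD i 0 == 0 then acc ++ [i] else acc) ([] : List Nat)
  let add_value := index_list_zero.foldl (fun acc i => acc + (7:Int) ^ i) 0
  add_value - kurang price

-- the for-loop over final_list with early break
def checkLoop : List Int → Bool → Bool
  | [], state => state
  | i :: rest, state =>
    let state := if i == 0 || i == 1 then true else state
    if i > 1 then false else checkLoop rest state

def bisa_transaksi (price : Int) : Bool :=
  checkLoop (base7 (kembalian price)) true

-- ===== PORT B =====
-- n = 0; while p > 0: n += 1; p //= 7
def countDigits (p : Int) : Int :=
  if _h : p > 0 then 1 + countDigits (PySem.Int.floordiv p 7) else 0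
termination_by p.toNat
decreasing_by
  rw [PySem.Int.floordiv_eq_ediv_of_pos (by norm_num : (0:Int) < 7)]
  omega

-- while k > 0: if k % 7 > 1: return False; k //= 7
def checkK (k : Int) : Bool :=
  if h : k > 0 then
    if PySem.Int.mod k 7 > 1 then false else checkK (PySem.Int.floordiv k 7)
  else true
termination_by k.toNat
decreasing_by
  rw [PySem.Int.floordiv_eq_ediv_of_pos (by norm_num : (0:Int) < 7)]
  omega

def bisa_transaksi_alt (price : Int) : Bool :=
  let n := countDigits price
  if n == 0 then true
  else
    let k := PySem.Int.floordiv (7 ^ n.toNat - 1) 6 - price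
    checkK k

-- ===== PRECONDITION & SPEC =====
def Spec_bisa_transaksi (price : Int) (out : Bool) : Prop := out = bisa_transaksi_alt price
instance (price : Int) (out : Bool) : Decidable (Spec_bisa_transaksi price out) := by unfold Spec_bisa_transaksi; infer_instance

-- ===== CLAIM (what is proved, stated in full; the proofs are below) =====
def Claim_equal_bisa_transaksi : Prop := ∀ (price : Int), Dom_bisa_transaksi price → Spec_bisa_transaksi price (bisa_transaksi price)

-- ===== LEMMAS AND PROOFS =====

-- base-7 positional value of a digit list, structurally
def Ffold (f : Int → Int) : List Int → Int
  | [] => 0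
  | d :: t => f d + 7 * Ffold f t

theorem base7_nonpos (p : Int) (hp : p ≤ 0) : base7 p = [] := by
  rw [base7, dif_neg (by omega)]

theorem base7_pos (p : Int) (hp : 0 < p) :
    base7 p = PySem.Int.mod p 7 :: base7 (PySem.Int.floordiv p 7) := by
  rw [base7, dif_pos hp]

theorem Ffold_map (g : Int → Int) (l : List Int) :
    Ffold (fun x => x) (l.map g) = Ffold g l := by
  induction l with
  | nil => rfl
  | cons d t ih => simp [Ffold, ih]

theorem foldl_range_weighted (f : Int → Int) :
    ∀ (l : List Int) (c acc : Int),
      (List.range l.length).foldl (fun a i => a + c * 7 ^ i * f (l.getD i 0)) acc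
        = acc + c * Ffold f l := by
  intro l
  induction l with
  | nil => intro c acc; simp [Ffold]
  | cons d t ih =>
    intro c acc
    rw [List.length_cons, List.range_succ_eq_map, List.foldl_cons, List.foldl_map]
    have hfun : (fun (a : Int) (i : ℕ) => a + c * 7 ^ (Nat.succ i) * f ((d :: t).getD (Nat.succ i) 0))
        = fun (a : Int) (i : ℕ) => a + (c * 7) * 7 ^ i * f (t.getD i 0) := by
      funext a i
      rw [List.getD_cons_succ, pow_succ]
      ring
    rw [hfun, ih (c * 7)]
    simp only [List.getD_cons_zero, Ffold]
    ring

theorem foldl_range_filter_pow :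
    ∀ (l : List Int) (c acc : Int),
      (((List.range l.length).filter (fun i => l.getD i 0 == 0)).foldl
          (fun a i => a + c * 7 ^ i) acc)
        = acc + c * Ffold (fun d => if d = 0 then 1 else 0) l := by
  intro l
  induction l with
  | nil => intro c acc; simp [Ffold]
  | cons d t ih =>
    intro c acc
    rw [List.length_cons, List.range_succ_eq_map, List.filter_cons]
    have hp : ((fun i => (d :: t).getD i 0 == 0) ∘ Nat.succ) = fun i => t.getD i 0 == 0 := by
      funext i; simp
    have hfun : (fun (a : Int) (i : ℕ) => a + c * 7 ^ (Nat.succ i))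
        = fun (a : Int) (i : ℕ) => a + (c * 7) * 7 ^ i := by
      funext a i; rw [pow_succ]; ring
    by_cases hd : d = 0
    · rw [if_pos (by simp [hd]), List.foldl_cons, List.filter_map, List.foldl_map, hp, hfun,
        ih (c * 7)]
      simp only [Ffold, if_pos hd]
      ring
    · rw [if_neg (by simp [hd]), List.filter_map, List.foldl_map, hp, hfun, ih (c * 7)]
      simp only [Ffold, if_neg hd]
      ring

-- the index_list_zero loop builds exactly the filtered index list
theorem foldl_append_ite {α : Type} (p : α → Bool) :
    ∀ (l : List α) (acc : List α),
      l.foldl (fun a x => if p x then a ++ [x] else a) acc = acc ++ l.filter p := by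
  intro l
  induction l with
  | nil => intro acc; simp
  | cons x t ih =>
    intro acc
    by_cases hx : p x
    · simp [hx, ih]
    · simp [hx, ih]

theorem foldl_range_weighted_id (l : List Int) (c acc : Int) :
    (List.range l.length).foldl (fun a i => a + c * 7 ^ i * l.getD i 0) acc
      = acc + c * Ffold (fun x => x) l := by
  have h := foldl_range_weighted (fun x => x) l c acc
  simpa using h

theorem kurang_eq (p : Int) :
    kurang p = Ffold (fun x => if x ≠ 0 then x - 1 else 0) (base7 p) := by
  unfold kurang
  show (List.range (base7 p).length).foldl
      (fun acc i => acc + 7 ^ i * (((base7 p).map (fun x => if x ≠ 0 then x - 1 else 0)).getD i 0)) 0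
    = Ffold (fun x => if x ≠ 0 then x - 1 else 0) (base7 p)
  have hlen : (base7 p).length = ((base7 p).map (fun x => if x ≠ 0 then x - 1 else 0)).length := by
    simp
  rw [hlen]
  have hfun : (fun (a : Int) (i : ℕ) =>
        a + 7 ^ i * ((base7 p).map (fun x => if x ≠ 0 then x - 1 else 0)).getD i 0)
      = fun (a : Int) (i : ℕ) =>
        a + 1 * 7 ^ i * (((base7 p).map (fun x => if x ≠ 0 then x - 1 else 0)).getD i 0) := by
    funext a i; ring
  rw [hfun, foldl_range_weighted_id, Ffold_map]
  ring

theorem kembalian_eq (p : Int) :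
    kembalian p = Ffold (fun _ => 1) (base7 p) - Ffold (fun x => x) (base7 p) := by
  unfold kembalian
  show ((List.range (base7 p).length).foldl
        (fun acc i => if (base7 p).getD i 0 == 0 then acc ++ [i] else acc) ([] : List Nat)).foldl
        (fun acc i => acc + (7:Int) ^ i) 0 - kurang p
    = Ffold (fun _ => 1) (base7 p) - Ffold (fun x => x) (base7 p)
  rw [foldl_append_ite (fun i => (base7 p).getD i 0 == 0), List.nil_append]
  have hfun : (fun (a : Int) (i : ℕ) => a + (7:Int) ^ i)
      = fun (a : Int) (i : ℕ) => a + 1 * 7 ^ i := by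
    funext a i; ring
  rw [hfun, foldl_range_filter_pow, kurang_eq]
  have key : ∀ l : List Int,
      Ffold (fun d => if d = 0 then 1 else 0) l - Ffold (fun x => if x ≠ 0 then x - 1 else 0) l
        = Ffold (fun _ => 1) l - Ffold (fun x => x) l := by
    intro l
    induction l with
    | nil => simp [Ffold]
    | cons d t ih =>
      by_cases hd : d = 0
      · subst hd
        simp only [Ffold, if_true]
        rw [if_neg (fun h => h rfl)]
        linarith
      · simp only [Ffold, if_neg hd, if_pos hd]
        linarith
  have := key (base7 p)
  linarith

theorem base7_val (p : Int) : 0 < p → Ffold (fun x => x) (base7 p) = p := by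
  intro hp
  rw [base7_pos p hp]
  by_cases hq : 0 < PySem.Int.floordiv p 7
  · have ih := base7_val (PySem.Int.floordiv p 7) hq
    simp only [Ffold, ih]
    have h := PySem.Int.floordiv_mul_add_mod p 7
    linarith
  · rw [base7_nonpos _ (by omega)]
    simp only [Ffold]
    rw [PySem.Int.mod_eq_emod_of_pos (by norm_num : (0:Int) < 7)]
    rw [PySem.Int.floordiv_eq_ediv_of_pos (by norm_num : (0:Int) < 7)] at hq
    omega
termination_by p.toNat
decreasing_by
  rw [PySem.Int.floordiv_eq_ediv_of_pos (by norm_num : (0:Int) < 7)]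
  omega

theorem repunit_len (l : List Int) : 6 * Ffold (fun _ => 1) l + 1 = 7 ^ l.length := by
  induction l with
  | nil => simp [Ffold]
  | cons d t ih => simp only [Ffold, List.length_cons, pow_succ]; linarith

theorem countDigits_len (p : Int) : countDigits p = ((base7 p).length : Int) := by
  by_cases hp : 0 < p
  · rw [countDigits, dif_pos hp, base7_pos p hp, countDigits_len (PySem.Int.floordiv p 7)]
    simp only [List.length_cons]
    push_cast
    omega
  · rw [countDigits, dif_neg hp, base7_nonpos p (by omega)]
    simp
termination_by p.toNat
decreasing_by
  rw [PySem.Int.floordiv_eq_ediv_of_pos (by norm_num : (0:Int) < 7)]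
  omega

theorem checkK_eq (k : Int) : checkK k = checkLoop (base7 k) true := by
  by_cases hk : 0 < k
  · rw [checkK, dif_pos hk, base7_pos k hk]
    simp only [checkLoop, ite_self]
    by_cases hm : PySem.Int.mod k 7 > 1
    · rw [if_pos hm, if_pos (by exact_mod_cast hm)]
    · rw [if_neg hm, if_neg (by exact_mod_cast hm)]
      exact checkK_eq (PySem.Int.floordiv k 7)
  · rw [checkK, dif_neg hk, base7_nonpos k (by omega)]
    rfl
termination_by k.toNat
decreasing_by
  rw [PySem.Int.floordiv_eq_ediv_of_pos (by norm_num : (0:Int) < 7)]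
  omega

-- ===== VERDICT (by name: the statement is the Claim_ definition above) =====
theorem bisa_transaksi_spec : Claim_equal_bisa_transaksi := by
  intro p _
  unfold Spec_bisa_transaksi bisa_transaksi bisa_transaksi_alt
  by_cases hp : 0 < p
  · have hcons := base7_pos p hp
    have hlen : (base7 p).length ≠ 0 := by rw [hcons]; simp
    rw [countDigits_len]
    rw [if_neg (by simpa using hlen)]
    rw [← checkK_eq]
    congr 1
    have hrep := repunit_len (base7 p)
    have hval := base7_val p hp
    have hkemb := kembalian_eq p
    have htn : ((((base7 p).length : Int)).toNat) = (base7 p).length := Int.toNat_natCast _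
    rw [htn]
    have h7 : (7:Int) ^ (base7 p).length - 1 = 6 * Ffold (fun _ => 1) (base7 p) := by linarith
    rw [h7, PySem.Int.floordiv_eq_ediv_of_pos (by norm_num : (0:Int) < 6),
      Int.mul_ediv_cancel_left _ (by norm_num : (6:Int) ≠ 0)]
    linarith
  · have h0 : base7 p = [] := base7_nonpos p (by omega)
    rw [countDigits_len, h0]
    simp only [List.length_nil, Int.natCast_zero, beq_self_eq_true, if_true]
    have hk : kembalian p = 0 := by
      rw [kembalian_eq, h0]; simp [Ffold]
    rw [hk, base7_nonpos 0 (by omega)]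
    rfl
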